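-- pv_equiv track=rewrite | github.com/marcosph-hub/python | conditionals/evil_or_odius_number.py | evil
-- ===== SOURCE A (Python) =====
-- def evil(n):
--   binary_number = format(n,'b')
--   binary_string = str(binary_number)
--   even_counter = 0
--   for number in binary_string:
--     if number == '1': even_counter += 1
--   if even_counter % 2 == 0: return "It's Evil!"
--   else: return "It's Odious!"
-- ===== SOURCE B (Python) =====
-- def evil(n):
--   x = abs(n)
--   parity = 0
--   while x:
--     parity ^= 1
--     x &= x - 1
--   return "It's Evil!" if parity == 0 else "It's Odious!"
-- ===== Notes on version B (the rewrite author's own statement) =====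
-- stated objective: idiomatic
-- what changed: Replaces formatting n as a binary string and scanning its characters for '1' with Brian Kernighan's bit-clearing loop (x &= x-1) that flips a parity bit once per set bit of abs(n).
import Mathlib
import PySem

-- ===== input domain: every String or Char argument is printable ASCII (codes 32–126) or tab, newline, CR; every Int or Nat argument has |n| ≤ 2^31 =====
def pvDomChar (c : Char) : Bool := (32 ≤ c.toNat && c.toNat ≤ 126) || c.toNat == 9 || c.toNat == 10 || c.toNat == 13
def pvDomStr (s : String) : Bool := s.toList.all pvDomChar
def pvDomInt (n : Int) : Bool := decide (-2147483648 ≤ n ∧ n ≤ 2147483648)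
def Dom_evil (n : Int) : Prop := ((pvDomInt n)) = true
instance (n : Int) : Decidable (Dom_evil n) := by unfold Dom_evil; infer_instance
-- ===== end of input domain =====

-- B changes the algorithm: Kernighan's set-bit-clearing loop instead of scanning a binary string.

-- ===== PORT A =====
-- format(m,'b') for positive m: binary digits, MSB first (exact for Nat by repeated /2)
def pvBinNat (m : Nat) : List Char :=
  if m = 0 then []
  else pvBinNat (m / 2) ++ [if m % 2 = 1 then '1' else '0']

-- format(n,'b'): '-' sign prefix for negatives, '0' for zero (exact for int)
def pvFormatB (n : Int) : List Char :=
  (if n < 0 then ['-'] else []) ++ (if n = 0 then ['0'] else pvBinNat n.natAbs)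

def evil (n : Int) : String :=
  let binary_string := pvFormatB n
  let even_counter : Int := binary_string.foldl
    (fun acc number => if number = '1' then acc + 1 else acc) 0
  if even_counter % 2 = 0 then "It's Evil!" else "It's Odious!"

-- ===== PORT B =====
-- while x: parity ^= 1; x &= x - 1
def pvKern (x : Nat) (parity : Nat) : Nat :=
  if h : x = 0 then parity
  else pvKern (x &&& (x - 1)) (parity ^^^ 1)
decreasing_by
  exact Nat.lt_of_le_of_lt (Nat.and_le_right) (Nat.sub_lt (Nat.pos_of_ne_zero h) one_pos)

def evil_alt (n : Int) : String :=
  if pvKern n.natAbs 0 = 0 then "It's Evil!" else "It's Odious!"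

-- ===== PRECONDITION & SPEC =====
def Spec_evil (n : Int) (out : String) : Prop := out = evil_alt n
instance (n : Int) (out : String) : Decidable (Spec_evil n out) := by unfold Spec_evil; infer_instance

-- ===== CLAIM (what is proved, stated in full; the proofs are below) =====
def Claim_equal_evil : Prop := ∀ (n : Int), Dom_evil n → Spec_evil n (evil n)


-- ===== LEMMAS AND PROOFS =====

-- popcount by low-bit recursion
def pvPc (m : Nat) : Nat :=
  if m = 0 then 0 else pvPc (m / 2) + m % 2

-- the standard binary recurrence of bitwise-and
theorem land_rec (x y : Nat) :
    x &&& y = 2 * (x / 2 &&& y / 2) + (x % 2) * (y % 2) := by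
  apply Nat.eq_of_testBit_eq
  intro i
  cases i with
  | zero =>
      simp only [Nat.testBit_zero, Nat.and_mod_two_eq_one]
      rcases Nat.mod_two_eq_zero_or_one x with hx | hx <;>
      rcases Nat.mod_two_eq_zero_or_one y with hy | hy <;>
        simp [hx, hy, Nat.mul_mod_right]
  | succ i =>
      have hd : (2 * (x / 2 &&& y / 2) + x % 2 * (y % 2)) / 2 = x / 2 &&& y / 2 := by
        have : x % 2 * (y % 2) < 2 := by
          rcases Nat.mod_two_eq_zero_or_one x with hx | hx <;> simp [hx] <;> omega
        omega
      rw [Nat.testBit_succ, Nat.testBit_succ, hd]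
      rw [show ((x &&& y) / 2).testBit i = (x &&& y).testBit (i+1) from
            (Nat.testBit_succ (x &&& y) i).symm,
          Nat.testBit_land, Nat.testBit_succ, Nat.testBit_succ, ← Nat.testBit_land]

theorem kern_clear_odd (x : Nat) (hx : x % 2 = 1) : x &&& (x - 1) = 2 * (x / 2) := by
  have h1 : (x - 1) % 2 = 0 := by omega
  have h2 : (x - 1) / 2 = x / 2 := by omega
  rw [land_rec, h1, h2, Nat.and_self, hx]; ring

theorem kern_clear_even (x : Nat) (hx : x % 2 = 0) (hpos : 0 < x) :
    x &&& (x - 1) = 2 * (x / 2 &&& (x / 2 - 1)) := by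
  have h1 : (x - 1) % 2 = 1 := by omega
  have h2 : (x - 1) / 2 = x / 2 - 1 := by omega
  rw [land_rec, h1, h2, hx]; ring

theorem pc_double (a : Nat) : pvPc (2 * a) = pvPc a := by
  by_cases h : a = 0
  · simp [h]
  · rw [pvPc, if_neg (by omega), Nat.mul_div_cancel_left _ (by norm_num), Nat.mul_mod_right]
    omega

theorem pc_clear (x : Nat) (hpos : 0 < x) : pvPc (x &&& (x - 1)) + 1 = pvPc x := by
  induction x using Nat.strong_induction_on with
  | _ x ih =>
    rcases Nat.mod_two_eq_zero_or_one x with hx | hx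
    · rw [kern_clear_even x hx hpos, pc_double]
      have hhalf : 0 < x / 2 := by omega
      rw [ih (x / 2) (by omega) hhalf]
      conv_rhs => rw [pvPc, if_neg (by omega : ¬ x = 0)]
      omega
    · rw [kern_clear_odd x hx, pc_double]
      conv_rhs => rw [pvPc, if_neg (by omega : ¬ x = 0)]
      omega

theorem kern_pc (x : Nat) (p : Nat) (hp : p ≤ 1) : pvKern x p = (p + pvPc x) % 2 := by
  induction x using Nat.strong_induction_on generalizing p with
  | _ x ih =>
    rw [pvKern]
    by_cases h : x = 0
    · rw [dif_pos h]
      simp [h, pvPc]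
      omega
    · rw [dif_neg h]
      have hlt : x &&& (x - 1) < x :=
        Nat.lt_of_le_of_lt Nat.and_le_right (Nat.sub_lt (Nat.pos_of_ne_zero h) one_pos)
      have hp1 : p ^^^ 1 ≤ 1 := by interval_cases p <;> decide
      rw [ih _ hlt _ hp1]
      have hpc := pc_clear x (Nat.pos_of_ne_zero h)
      have hxor : p ^^^ 1 = 1 - p := by interval_cases p <;> decide
      omega

-- A's fold counts '1' characters
theorem fold_count (l : List Char) (acc : Int) :
    l.foldl (fun acc number => if number = '1' then acc + 1 else acc) acc
      = acc + (l.count '1' : Int) := by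
  induction l generalizing acc with
  | nil => simp
  | cons c t ih =>
      by_cases h : c = '1' <;> simp [List.foldl, h, ih] <;> ring

theorem count_bin (m : Nat) : (pvBinNat m).count '1' = pvPc m := by
  induction m using Nat.strong_induction_on with
  | _ m ih =>
    rw [pvBinNat, pvPc]
    by_cases h : m = 0
    · simp [h]
    · rw [if_neg h, if_neg h, List.count_append, ih (m / 2) (Nat.div_lt_self (by omega) one_lt_two)]
      rcases Nat.mod_two_eq_zero_or_one m with hm | hm <;> simp [hm]

theorem count_format (n : Int) : (pvFormatB n).count '1' = pvPc n.natAbs := by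
  rw [pvFormatB, List.count_append]
  by_cases h0 : n = 0
  · simp [h0, pvPc]
  · rw [if_neg h0, count_bin]
    by_cases hneg : n < 0 <;> simp [hneg]

-- ===== VERDICT (by name: the statement is the Claim_ definition above) =====
theorem evil_spec : Claim_equal_evil := by
  intro n _
  unfold Spec_evil evil evil_alt
  simp only []
  rw [fold_count, count_format, kern_pc n.natAbs 0 (by omega)]
  simp only [Int.zero_add, Nat.zero_add]
  by_cases h : pvPc n.natAbs % 2 = 0
  · rw [if_pos h, if_pos (by omega : (pvPc n.natAbs : Int) % 2 = 0)]
  · rw [if_neg h, if_neg (by omega : ¬ (pvPc n.natAbs : Int) % 2 = 0)]
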